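-- pv_equiv track=rewrite | github.com/IN-CORE/pyincore | pyincore/models/fragilitycurveset.py | is_there_small_overlap
-- ===== SOURCE A (Python) =====
-- def is_there_small_overlap(limit_states):
--     small_overlap = []
--     keys = list(limit_states)
--     for ls_index in range(len(limit_states)):
--         for tmp_index in range(ls_index + 1, len(limit_states)):
--             if limit_states[keys[ls_index]] < limit_states[keys[tmp_index]]:
--                 # if previous limit state is less than the next, there's an overlap
--                 small_overlap.append(ls_index)
--                 break
--
--     return small_overlap
-- ===== SOURCE B (Python) =====
-- def is_there_small_overlap(limit_states):
--     # single right-to-left suffix-maximum pass instead of A's nested index scans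
--     vals = list(limit_states.values())
--     out = []
--     best = None
--     for i in range(len(vals) - 1, -1, -1):
--         v = vals[i]
--         if best is not None and v < best:
--             out.append(i)
--         if best is None or v > best:
--             best = v
--     out.reverse()
--     return out
-- ===== Notes on version B (the rewrite author's own statement) =====
-- stated objective: faster
-- what changed: Replaces the quadratic nested scan over index pairs with a single right-to-left suffix-maximum pass: index i is emitted iff its value is below the maximum of the later values.
import Mathlib
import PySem

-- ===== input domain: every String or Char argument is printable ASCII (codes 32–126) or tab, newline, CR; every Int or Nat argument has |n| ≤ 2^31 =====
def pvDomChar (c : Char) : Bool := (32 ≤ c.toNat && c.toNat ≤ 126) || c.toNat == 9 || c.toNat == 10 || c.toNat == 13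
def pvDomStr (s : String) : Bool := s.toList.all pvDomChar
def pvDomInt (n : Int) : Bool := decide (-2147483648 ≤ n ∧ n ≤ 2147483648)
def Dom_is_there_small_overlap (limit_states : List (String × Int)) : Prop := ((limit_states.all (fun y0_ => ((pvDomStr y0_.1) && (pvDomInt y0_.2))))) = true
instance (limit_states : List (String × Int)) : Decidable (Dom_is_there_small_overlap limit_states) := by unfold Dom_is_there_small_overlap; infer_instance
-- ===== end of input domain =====

-- B replaces A's nested index scans by one right-to-left suffix-maximum pass (objective: faster).

-- ===== PORT A =====
-- inner loop 'for tmp_index in range(ls_index+1, n): if vi < d[keys[tmp_index]]: … break'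
-- (the lookup of d[keys[ls_index]] is hoisted as vi; keys are present, so getD is exact)
def pvInnerA (d : PySem.Dict String Int) (vi : Int) (rest : List String) : Bool :=
  match rest with
  | [] => false
  | k :: r => if vi < d.getD k 0 then true else pvInnerA d vi r

def is_there_small_overlap (limit_states : List (String × Int)) : List Int :=
  let d := PySem.Dict.ofList limit_states
  let keys := d.keys
  (List.range keys.length).foldl
    (fun acc i =>
      if pvInnerA d (d.getD (keys.getD i "") 0) (keys.drop (i + 1)) then acc ++ [(i : Int)]
      else acc) []

-- ===== PORT B =====
-- right-to-left pass of Source B: state = (best = max of later values, out); index i is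
-- prepended exactly when vals[i] < best, mirroring append-then-reverse
def pvSuffix (i : Int) (vals : List Int) : Option Int × List Int :=
  match vals with
  | [] => (none, [])
  | v :: rest =>
    let (best, out) := pvSuffix (i + 1) rest
    match best with
    | none => (some v, out)
    | some b => (some (max v b), if v < b then i :: out else out)

def is_there_small_overlap_alt (limit_states : List (String × Int)) : List Int :=
  let vals := (PySem.Dict.ofList limit_states).values
  (pvSuffix 0 vals).2

-- ===== PRECONDITION & SPEC =====
def Spec_is_there_small_overlap (limit_states : List (String × Int)) (out : List Int) : Prop := out = is_there_small_overlap_alt limit_states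
instance (limit_states : List (String × Int)) (out : List Int) : Decidable (Spec_is_there_small_overlap limit_states out) := by unfold Spec_is_there_small_overlap; infer_instance

-- ===== CLAIM (what is proved, stated in full; the proofs are below) =====
def Claim_equal_is_there_small_overlap : Prop := ∀ (limit_states : List (String × Int)), Dom_is_there_small_overlap limit_states → Spec_is_there_small_overlap limit_states (is_there_small_overlap limit_states)

-- ===== LEMMAS AND PROOFS =====

-- max of a nonempty list, as maintained by pvSuffix's first component
def pvListMax : List Int → Option Int
  | [] => none
  | v :: rest =>
    some (match pvListMax rest with
          | none => v
          | some b => max v b)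

theorem pvListMax_eq_none_iff (l : List Int) : pvListMax l = none ↔ l = [] := by
  cases l <;> simp [pvListMax]

theorem lt_pvListMax (l : List Int) (v b : Int) (h : pvListMax l = some b) :
    decide (v < b) = l.any (fun w => decide (v < w)) := by
  induction l generalizing b with
  | nil => simp [pvListMax] at h
  | cons w rest ih =>
    simp only [pvListMax] at h
    cases hr : pvListMax rest with
    | none =>
      have : rest = [] := (pvListMax_eq_none_iff rest).1 hr
      subst this
      simp [pvListMax] at h
      subst h; simp
    | some b' =>
      rw [hr] at h
      cases h
      simp only [List.any_cons, ← ih b' hr]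
      by_cases h1 : v < w <;> by_cases h2 : v < b' <;>
        simp [h1, h2]

-- the condition at index j: some later value is greater
def pvCond (vals : List Int) (j : Nat) : Bool :=
  (vals.drop (j + 1)).any (fun w => decide (vals.getD j 0 < w))

-- shift a list of Nat indices by an Int offset
def pvShift (i : Int) : List Nat → List Int
  | [] => []
  | a :: l => (i + Int.ofNat a) :: pvShift i l

theorem pvShift_succ (i : Int) (l : List Nat) :
    pvShift i (l.map Nat.succ) = pvShift (i + 1) l := by
  induction l with
  | nil => rfl
  | cons a l ih =>
    simp only [List.map_cons, pvShift, ih]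
    congr 1
    simp only [Int.ofNat_eq_natCast, Nat.succ_eq_add_one]
    push_cast
    ring

theorem pvShift_zero (l : List Nat) : pvShift 0 l = l.map Int.ofNat := by
  induction l with
  | nil => rfl
  | cons a l ih => simp [pvShift, ih]

theorem pvSuffix_spec (vals : List Int) (i : Int) :
    (pvSuffix i vals).1 = pvListMax vals ∧
    (pvSuffix i vals).2 = pvShift i ((List.range vals.length).filter (pvCond vals)) := by
  induction vals generalizing i with
  | nil => simp [pvSuffix, pvListMax, pvShift]
  | cons v rest ih =>
    obtain ⟨h1, h2⟩ := ih (i + 1)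
    cases hr : pvListMax rest with
    | none =>
      have : rest = [] := (pvListMax_eq_none_iff rest).1 hr
      subst this
      simp [pvSuffix, pvListMax, pvCond, pvShift]
    | some b =>
      have hpair : pvSuffix (i + 1) rest =
          (some b, pvShift (i + 1) ((List.range rest.length).filter (pvCond rest))) := by
        apply Prod.ext <;> simp [h1, h2, hr]

      have hcond0 : pvCond (v :: rest) 0 = decide (v < b) := by
        simp [pvCond, lt_pvListMax rest v b hr]
      have hconds : ∀ j, pvCond (v :: rest) (j + 1) = pvCond rest j := by
        intro j; simp [pvCond]
      have hmapfilter :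
          ((List.range rest.length).map Nat.succ).filter (pvCond (v :: rest)) =
            ((List.range rest.length).filter (pvCond rest)).map Nat.succ := by
        have hpt : ∀ j ∈ List.range rest.length,
            (pvCond (v :: rest) ∘ Nat.succ) j = pvCond rest j := by
          intro j _
          simp [Function.comp, hconds j]
        rw [List.filter_map, List.filter_congr hpt]
      refine ⟨?_, ?_⟩
      · simp [pvSuffix, hpair, pvListMax, hr]
      · simp only [pvSuffix, hpair]
        rw [List.length_cons, List.range_succ_eq_map, List.filter_cons, hcond0, hmapfilter]
        by_cases hvb : v < b
        · simp only [hvb, decide_true, if_true, pvShift, pvShift_succ]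
          simp
        · simp only [hvb, decide_false, Bool.false_eq_true, if_false, pvShift_succ]

theorem pvInnerA_any (d : PySem.Dict String Int) (v : Int) (rest : List String) :
    pvInnerA d v rest = (rest.map (fun k => d.getD k 0)).any (fun w => decide (v < w)) := by
  induction rest with
  | nil => simp [pvInnerA]
  | cons k r ih =>
    simp only [pvInnerA, List.map_cons, List.any_cons, ih]
    by_cases h : v < d.getD k 0 <;> simp [h]

theorem A_eq_filter (limit_states : List (String × Int)) :
    is_there_small_overlap limit_states =
      ((List.range ((PySem.Dict.ofList limit_states).values.length)).filter
          (pvCond (PySem.Dict.ofList limit_states).values)).map Int.ofNat := by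
  unfold is_there_small_overlap
  set d := PySem.Dict.ofList limit_states with hd
  have hnd : d.keys.Nodup := PySem.Dict.nodup_keys_ofList limit_states
  have hv : d.values = d.keys.map (fun k => d.getD k 0) :=
    PySem.Dict.values_eq_map_keys d hnd 0
  rw [PySem.List.foldl_append_if]
  rw [List.nil_append]
  have hlen : d.values.length = d.keys.length := by rw [hv, List.length_map]
  rw [hlen]
  have hfilter :
      (List.range d.keys.length).filter
          (fun i => pvInnerA d (d.getD (d.keys.getD i "") 0) (d.keys.drop (i + 1))) =
        (List.range d.keys.length).filter (pvCond d.values) := by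
    apply List.filter_congr
    intro i hi
    rw [List.mem_range] at hi
    have hkey : d.keys.getD i "" = d.keys[i] := List.getD_eq_getElem d.keys "" hi
    have hval : d.getD (d.keys.getD i "") 0 = d.values.getD i 0 := by
      rw [hkey, hv]
      rw [List.getD_eq_getElem _ 0 (by rw [List.length_map]; exact hi)]
      simp
    have hdrop : (d.keys.drop (i + 1)).map (fun k => d.getD k 0) = d.values.drop (i + 1) := by
      rw [hv, List.map_drop]
    rw [pvInnerA_any, hdrop, hval]
    rfl
  rw [hfilter]
  rfl

-- ===== VERDICT (by name: the statement is the Claim_ definition above) =====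
theorem is_there_small_overlap_spec : Claim_equal_is_there_small_overlap := by
  intro limit_states _
  unfold Spec_is_there_small_overlap is_there_small_overlap_alt
  rw [A_eq_filter]
  rw [(pvSuffix_spec (PySem.Dict.ofList limit_states).values 0).2]
  rw [pvShift_zero]
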